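-- pv_equiv track=rewrite | github.com/TEEN-BOOM/NeoBot | NeoBot/cogs/Font.py | convert
-- ===== SOURCE A (Python) =====
-- alphabet = dict(zip("abcdefghijklmnopqrstuvwxyz1234567890", range(0, 36)))
--
-- uppercase_alphabet = dict(zip("ABCDEFGHIJKLMNOPQRSTUVWXYZ", range(0, 26)))
--
-- space = " "
--
-- def convert(string: str, uppercase: list, lowercase: list):
--     string = str(string)
--     returnthis = ""
--     for word in string:
--         for letter in word:
--             if letter in alphabet:
--                 returnthis += lowercase[alphabet[letter]]
--             elif letter in uppercase_alphabet:
--                 returnthis += uppercase[uppercase_alphabet[letter]]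
--             elif letter == space:
--                 returnthis += " "
--             else:
--                 returnthis += letter
--     return returnthis
-- ===== SOURCE B (Python) =====
-- def convert(string: str, uppercase: list, lowercase: list):
--     s = str(string)
--
--     def piece(c):
--         o = ord(c)
--         if 97 <= o <= 122:
--             return lowercase[o - 97]
--         if 49 <= o <= 57:
--             return lowercase[o - 23]
--         if o == 48:
--             return lowercase[35]
--         if 65 <= o <= 90:
--             return uppercase[o - 65]
--         return c
--
--     def go(i, j):
--         if i >= j:
--             return ""
--         if j == i + 1:
--             return piece(s[i])
--         m = (i + j) // 2
--         return go(i, m) + go(m, j)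
--
--     return go(0, len(s))
-- ===== Notes on version B (the rewrite author's own statement) =====
-- stated objective: alternative
-- what changed: Eliminates the lookup dicts in favour of closed-form ordinal-range arithmetic (ord(c)-97 / ord(c)-23 / 35 / ord(c)-65) and builds the result by divide-and-conquer concatenation over string halves instead of a left-to-right accumulator loop.
import Mathlib
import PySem

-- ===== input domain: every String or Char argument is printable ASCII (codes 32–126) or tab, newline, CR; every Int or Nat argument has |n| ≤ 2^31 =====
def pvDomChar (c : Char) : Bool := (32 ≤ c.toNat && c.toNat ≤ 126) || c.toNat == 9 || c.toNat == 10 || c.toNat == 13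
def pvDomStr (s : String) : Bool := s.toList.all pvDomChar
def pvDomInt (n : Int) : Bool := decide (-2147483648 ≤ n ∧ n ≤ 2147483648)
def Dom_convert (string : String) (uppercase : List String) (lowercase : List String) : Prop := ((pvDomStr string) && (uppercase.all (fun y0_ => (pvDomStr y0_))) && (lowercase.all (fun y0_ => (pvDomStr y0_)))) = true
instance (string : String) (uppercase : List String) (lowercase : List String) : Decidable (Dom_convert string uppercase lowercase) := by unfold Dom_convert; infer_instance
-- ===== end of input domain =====

-- B replaces A's dict lookups and accumulator loop by closed-form ordinal arithmetic
-- and divide-and-conquer concatenation over string halves (alternative, not claimed faster).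
set_option maxRecDepth 8192


-- keys of the module-level dicts `alphabet` and `uppercase_alphabet` (value = index = position)
def pvAlphaChars : List Char := ['a', 'b', 'c', 'd', 'e', 'f', 'g', 'h', 'i', 'j', 'k', 'l', 'm', 'n', 'o', 'p', 'q', 'r', 's', 't', 'u', 'v', 'w', 'x', 'y', 'z', '1', '2', '3', '4', '5', '6', '7', '8', '9', '0']
def pvUpperChars : List Char := ['A', 'B', 'C', 'D', 'E', 'F', 'G', 'H', 'I', 'J', 'K', 'L', 'M', 'N', 'O', 'P', 'Q', 'R', 'S', 'T', 'U', 'V', 'W', 'X', 'Y', 'Z']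

-- ===== PORT A =====
-- A's `for word in string: for letter in word` visits each character once (each `word`
-- is a 1-character string); `letter in alphabet` / `alphabet[letter]` = membership /
-- position in pvAlphaChars. Strings are accumulated as List Char; outside Pre_convert
-- (index out of range, Python IndexError) List.getD's default is junk.
def convert (string : String) (uppercase : List String) (lowercase : List String) : String :=
  String.ofList (string.toList.foldl (fun acc letter =>
    if pvAlphaChars.contains letter then
      acc ++ (lowercase.getD (pvAlphaChars.idxOf letter) "").toList
    else if pvUpperChars.contains letter then
      acc ++ (uppercase.getD (pvUpperChars.idxOf letter) "").toList
    else if letter = ' ' then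
      acc ++ [' ']
    else
      acc ++ [letter]) [])

-- ===== PORT B =====
-- Source B's `piece(c)`: ordinal-range arithmetic, no tables. Its list indexings are in
-- range exactly on Pre_convert; outside it (Python IndexError) getD's default is junk.
def pvPiece (uppercase lowercase : List String) (c : Char) : List Char :=
  let o := c.toNat
  if 97 ≤ o ∧ o ≤ 122 then (lowercase.getD (o - 97) "").toList
  else if 49 ≤ o ∧ o ≤ 57 then (lowercase.getD (o - 23) "").toList
  else if o = 48 then (lowercase.getD 35 "").toList
  else if 65 ≤ o ∧ o ≤ 90 then (uppercase.getD (o - 65) "").toList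
  else [c]

-- Source B's `go(i, j)`: divide-and-conquer over index halves; s[i] (always in range when
-- called from the top level) is ported as getD with a junk default.
def pvGo (uppercase lowercase : List String) (s : List Char) (i j : Nat) : List Char :=
  if i ≥ j then []
  else if j = i + 1 then pvPiece uppercase lowercase (s.getD i ' ')
  else pvGo uppercase lowercase s i ((i + j) / 2) ++ pvGo uppercase lowercase s ((i + j) / 2) j
termination_by j - i
decreasing_by all_goals omega

def convert_alt (string : String) (uppercase : List String) (lowercase : List String) : String :=
  String.ofList (pvGo uppercase lowercase string.toList 0 string.toList.length)

-- ===== PRECONDITION & SPEC =====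
-- Pre_ excludes exactly the inputs where the Python A raises IndexError (B raises the
-- same IndexError there): some character of the string is a key of
-- alphabet/uppercase_alphabet whose index reaches past the end of the font list.
def Pre_convert (string : String) (uppercase : List String) (lowercase : List String) : Prop :=
  (string.toList.all (fun c =>
    (!(pvAlphaChars.contains c) || decide (pvAlphaChars.idxOf c < lowercase.length)) &&
    (!(pvUpperChars.contains c) || decide (pvUpperChars.idxOf c < uppercase.length)))) = true
instance (string : String) (uppercase : List String) (lowercase : List String) : Decidable (Pre_convert string uppercase lowercase) := by unfold Pre_convert; infer_instance

def pvWitness_convert : String × List String × List String := ("aA!", ["U"], ["l"])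

def Spec_convert (string : String) (uppercase : List String) (lowercase : List String) (out : String) : Prop := out = convert_alt string uppercase lowercase
instance (string : String) (uppercase : List String) (lowercase : List String) (out : String) : Decidable (Spec_convert string uppercase lowercase out) := by unfold Spec_convert; infer_instance

-- ===== CLAIM (what is proved, stated in full; the proofs are below) =====
def Claim_equal_convert : Prop := ∀ (string : String) (uppercase : List String) (lowercase : List String), Dom_convert string uppercase lowercase → Pre_convert string uppercase lowercase → Spec_convert string uppercase lowercase (convert string uppercase lowercase)

-- ===== LEMMAS AND PROOFS =====

-- numeric ranges land in the tables
theorem mem_alpha_lower : ∀ n < 123, 97 ≤ n → Char.ofNat n ∈ pvAlphaChars := by decide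
theorem mem_alpha_digit : ∀ n < 58, 48 ≤ n → Char.ofNat n ∈ pvAlphaChars := by decide
theorem mem_upper_range : ∀ n < 91, 65 ≤ n → Char.ofNat n ∈ pvUpperChars := by decide

-- A's four-way branch on one character equals B's ordinal-arithmetic piece
theorem step_eq (uppercase lowercase : List String) (c : Char) :
    (if pvAlphaChars.contains c then
      (lowercase.getD (pvAlphaChars.idxOf c) "").toList
    else if pvUpperChars.contains c then
      (uppercase.getD (pvUpperChars.idxOf c) "").toList
    else if c = ' ' then [' '] else [c])
    = pvPiece uppercase lowercase c := by
  by_cases ha : c ∈ pvAlphaChars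
  · fin_cases ha <;> rfl
  · by_cases hb : c ∈ pvUpperChars
    · fin_cases hb <;> rfl
    · have h1 : ¬(97 ≤ c.toNat ∧ c.toNat ≤ 122) := fun ⟨x, y⟩ => ha (by
        have := mem_alpha_lower c.toNat (by omega) x
        rwa [Char.ofNat_toNat] at this)
      have h2 : ¬(49 ≤ c.toNat ∧ c.toNat ≤ 57) := fun ⟨x, y⟩ => ha (by
        have := mem_alpha_digit c.toNat (by omega) (by omega)
        rwa [Char.ofNat_toNat] at this)
      have h3 : ¬(c.toNat = 48) := fun x => ha (by
        have := mem_alpha_digit c.toNat (by omega) (by omega)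
        rwa [Char.ofNat_toNat] at this)
      have h4 : ¬(65 ≤ c.toNat ∧ c.toNat ≤ 90) := fun ⟨x, y⟩ => hb (by
        have := mem_upper_range c.toNat (by omega) x
        rwa [Char.ofNat_toNat] at this)
      rw [if_neg (fun hx => ha (List.contains_iff_mem.mp hx)),
          if_neg (fun hx => hb (List.contains_iff_mem.mp hx))]
      unfold pvPiece
      rw [if_neg h1, if_neg h2, if_neg h3, if_neg h4]
      by_cases hs : c = ' '
      · subst hs; rw [if_pos rfl]
      · rw [if_neg hs]

-- A's append-fold equals flatMap of the piece function
theorem fold_eq (uppercase lowercase : List String) (l : List Char) (acc : List Char) :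
    l.foldl (fun acc letter =>
      if pvAlphaChars.contains letter then
        acc ++ (lowercase.getD (pvAlphaChars.idxOf letter) "").toList
      else if pvUpperChars.contains letter then
        acc ++ (uppercase.getD (pvUpperChars.idxOf letter) "").toList
      else if letter = ' ' then acc ++ [' ']
      else acc ++ [letter]) acc
    = acc ++ l.flatMap (pvPiece uppercase lowercase) := by
  induction l generalizing acc with
  | nil => simp
  | cons c l ih =>
    simp only [List.foldl_cons, List.flatMap_cons]
    rw [ih]
    have : (if pvAlphaChars.contains c then
        acc ++ (lowercase.getD (pvAlphaChars.idxOf c) "").toList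
      else if pvUpperChars.contains c then
        acc ++ (uppercase.getD (pvUpperChars.idxOf c) "").toList
      else if c = ' ' then acc ++ [' ']
      else acc ++ [c]) = acc ++ pvPiece uppercase lowercase c := by
      rw [← step_eq uppercase lowercase c]
      split_ifs <;> rfl
    rw [this, List.append_assoc]

-- B's divide-and-conquer over [i, j) equals flatMap of the piece over that segment
theorem pvGo_eq (uppercase lowercase : List String) (s : List Char) :
    ∀ k i j, j - i ≤ k → j ≤ s.length →
      pvGo uppercase lowercase s i j
        = (((s.drop i).take (j - i)).flatMap (pvPiece uppercase lowercase)) := by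
  intro k
  induction k with
  | zero =>
    intro i j hk hj
    rw [pvGo, if_pos (by omega)]
    rw [show j - i = 0 by omega]
    simp
  | succ k ih =>
    intro i j hk hj
    rw [pvGo]
    by_cases hij : i ≥ j
    · rw [if_pos hij, show j - i = 0 by omega]; simp
    · rw [if_neg hij]
      by_cases h1 : j = i + 1
      · rw [if_pos h1]
        have hi : i < s.length := by omega
        rw [show j - i = 1 by omega]
        simp only [List.getD_eq_getElem?_getD, List.getElem?_eq_getElem hi, Option.getD_some,
          List.drop_eq_getElem_cons hi, List.take_succ_cons, List.take_zero,
          List.flatMap_cons, List.flatMap_nil, List.append_nil]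
      · rw [if_neg h1]
        have hm1 : (i + j) / 2 - i ≤ k := by omega
        have hm2 : j - (i + j) / 2 ≤ k := by omega
        rw [ih i ((i + j) / 2) hm1 (by omega), ih ((i + j) / 2) j hm2 hj]
        rw [← List.flatMap_append]
        congr 1
        rw [show j - i = ((i + j) / 2 - i) + (j - (i + j) / 2) by omega, List.take_add,
            List.drop_drop, show i + ((i + j) / 2 - i) = (i + j) / 2 by omega]

-- ===== VERDICT (by name: the statement is the Claim_ definition above) =====
theorem convert_spec : Claim_equal_convert := by
  intro string uppercase lowercase _ _
  unfold Spec_convert convert convert_alt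
  rw [fold_eq, List.nil_append,
      pvGo_eq uppercase lowercase string.toList string.toList.length 0 string.toList.length
        (by omega) (by omega)]
  simp only [Nat.sub_zero, List.drop_zero]
  rw [List.take_length]
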